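-- pv_equiv track=rewrite | github.com/ruijorgenobre/deepMirCut | graph_mir_classificationDVs.py | deduct_padding
-- ===== SOURCE A (Python) =====
-- def deduct_padding(seq):
--     in_3p_padding = True
--     seq_start = 0
--     seq_stop = len(seq) - 1
--     for i in range(0,len(seq)):
--         if seq[i].upper() == 'P' and in_3p_padding == True:
--             seq_start += 1
--         elif in_3p_padding == True:
--             in_3p_padding = False
--         elif seq[i].upper() == 'P' and in_3p_padding == False:
--             seq_stop = i - 1
--             return seq_start,seq_stop
--     return seq_start,seq_stop
-- ===== SOURCE B (Python) =====
-- def deduct_padding(seq):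
--     # Collect the positions of all padding characters once; the leading padding
--     # run is exactly the longest prefix of that position list equal to 0,1,2,...
--     ps = [i for i, c in enumerate(seq) if c.upper() == 'P']
--     start = 0
--     while start < len(ps) and ps[start] == start:
--         start += 1
--     if start < len(ps):
--         return start, ps[start] - 1
--     return start, len(seq) - 1
-- ===== Notes on version B (the rewrite author's own statement) =====
-- stated objective: alternative
-- what changed: Instead of A's single flagged scan with early return, B builds the list of all padding-character positions once and reads the answer off it: the leading-padding count is the longest prefix of that list equal to 0,1,2,..., and the stop index comes from the next listed position.
import Mathlib
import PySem

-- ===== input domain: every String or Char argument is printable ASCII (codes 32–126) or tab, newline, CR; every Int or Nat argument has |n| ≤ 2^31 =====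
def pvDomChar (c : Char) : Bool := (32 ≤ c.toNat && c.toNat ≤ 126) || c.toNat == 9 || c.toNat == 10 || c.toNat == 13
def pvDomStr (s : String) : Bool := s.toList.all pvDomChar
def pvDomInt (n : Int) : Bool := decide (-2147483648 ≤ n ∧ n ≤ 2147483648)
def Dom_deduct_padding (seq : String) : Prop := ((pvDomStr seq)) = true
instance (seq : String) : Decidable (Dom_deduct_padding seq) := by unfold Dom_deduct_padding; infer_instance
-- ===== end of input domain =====

-- B replaces A's flagged single scan by a position-list reading: collect all padding positions,
-- take the longest prefix equal to 0,1,2,… (alternative decomposition, same O(n) cost).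

-- ===== PORT A =====
-- the for-loop of A: chars still to visit, current index i, the in_3p_padding flag, seq_start, seq_stop
def pvAGo : List Char → Int → Bool → Int → Int → Int × Int
  | [], _, _, start, stop => (start, stop)
  | c :: rest, i, pad, start, stop =>
    if (PySem.Chars.upperChar c == 'P') && pad then
      pvAGo rest (i + 1) pad (start + 1) stop
    else if pad then
      pvAGo rest (i + 1) false start stop
    else if (PySem.Chars.upperChar c == 'P') && !pad then
      (start, i - 1)
    else
      pvAGo rest (i + 1) pad start stop

def deduct_padding (seq : String) : Int × Int :=
  pvAGo seq.toList 0 true 0 (PySem.Str.len seq - 1)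

-- ===== PORT B =====
-- the while loop of B: 'while start < len(ps) and ps[start] == start: start += 1'
-- (structural on a fuel bound; the guard makes the same computation total)
def pvStartLoopGo : List Int → Nat → Nat → Nat
  | _, 0, s => s
  | ps, fuel + 1, s =>
    if s < ps.length ∧ ps.getD s 0 = (s : Int) then pvStartLoopGo ps fuel (s + 1) else s

def pvStartLoop (ps : List Int) (s : Nat) : Nat :=
  pvStartLoopGo ps (ps.length - s) s

def deduct_padding_alt (seq : String) : Int × Int :=
  -- ps = [i for i, c in enumerate(seq) if c.upper() == 'P']
  let ps : List Int :=
    ((PySem.List.enumerate seq.toList 0).filter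
        (fun p => PySem.Chars.upperChar p.2 == 'P')).map (fun p => p.1)
  let start := pvStartLoop ps 0
  if start < ps.length then ((start : Int), ps.getD start 0 - 1)
  else ((start : Int), PySem.Str.len seq - 1)

-- ===== PRECONDITION & SPEC =====
def Spec_deduct_padding (seq : String) (out : Int × Int) : Prop := out = deduct_padding_alt seq
instance (seq : String) (out : Int × Int) : Decidable (Spec_deduct_padding seq out) := by unfold Spec_deduct_padding; infer_instance

-- ===== CLAIM (what is proved, stated in full; the proofs are below) =====
def Claim_equal_deduct_padding : Prop := ∀ (seq : String), Dom_deduct_padding seq → Spec_deduct_padding seq (deduct_padding seq)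

-- ===== LEMMAS AND PROOFS =====

-- the pad=true phase of A: count the leading (upper='P') run, then hand over to pad=false after one more char
lemma pv_aGo_pad (cs : List Char) (i start stop : Int) :
    pvAGo cs i true start stop =
      (match cs.dropWhile (fun c => PySem.Chars.upperChar c == 'P') with
       | [] => (start + (cs.takeWhile (fun c => PySem.Chars.upperChar c == 'P')).length, stop)
       | _ :: rest => pvAGo rest (i + (cs.takeWhile (fun c => PySem.Chars.upperChar c == 'P')).length + 1) false (start + (cs.takeWhile (fun c => PySem.Chars.upperChar c == 'P')).length) stop) := by
  induction cs generalizing i start with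
  | nil => simp [pvAGo, List.dropWhile, List.takeWhile]
  | cons c rest ih =>
    by_cases hp : PySem.Chars.upperChar c == 'P'
    · simp only [List.dropWhile_cons, List.takeWhile_cons, hp, if_true]
      simp only [pvAGo, hp, Bool.true_and, if_true]
      rw [ih]
      cases h : rest.dropWhile (fun c => PySem.Chars.upperChar c == 'P') with
      | nil => simp only [h]; push_cast [List.length_cons]; congr 1; omega
      | cons d tl =>
        simp only [h]
        congr 1 <;> push_cast [List.length_cons] <;> omega
    · simp only [List.dropWhile_cons, List.takeWhile_cons, hp, if_false, Bool.false_eq_true]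
      simp [pvAGo, hp]

-- the pad=false phase of A: the first (upper='P') position decides the result
lemma pv_aGo_scan (cs : List Char) (i start stop : Int) :
    pvAGo cs i false start stop =
      (match cs.findIdx? (fun c => PySem.Chars.upperChar c == 'P') with
       | some idx => (start, i + idx - 1)
       | none => (start, stop)) := by
  induction cs generalizing i with
  | nil => simp [pvAGo]
  | cons c rest ih =>
    by_cases hp : (PySem.Chars.upperChar c == 'P') = true
    · simp [pvAGo, hp, List.findIdx?_cons]
    · have hstep : pvAGo (c :: rest) i false start stop = pvAGo rest (i + 1) false start stop := by
        simp [pvAGo, hp]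
      rw [hstep, ih, List.findIdx?_cons]
      cases h : rest.findIdx? (fun c => PySem.Chars.upperChar c == 'P') with
      | none => simp [hp]
      | some idx =>
        simp only [hp, if_false, Bool.false_eq_true, Option.map_some]
        push_cast
        simp only [Prod.mk.injEq]
        exact ⟨trivial, by ring⟩

-- reference recursion for B's filtered position list
def pvPos (l : List Char) : List Int :=
  match l with
  | [] => []
  | a :: t =>
    if PySem.Chars.upperChar a == 'P' then 0 :: (pvPos t).map (· + 1)
    else (pvPos t).map (· + 1)

-- reference recursion for B's while loop over a suffix, also yielding the element it stops on
def pvG : List Int → Nat → Nat × Option Int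
  | [], s => (s, none)
  | x :: t, s => if x = (s : Int) then pvG t (s + 1) else (s, some x)

lemma pv_enum_filter (l : List Char) (s : Int) :
    (((PySem.List.enumerate l s).filter
        (fun p => PySem.Chars.upperChar p.2 == 'P')).map (fun p => p.1))
      = (pvPos l).map (· + s) := by
  induction l generalizing s with
  | nil => simp [PySem.List.enumerate_nil, pvPos]
  | cons a t ih =>
    rw [PySem.List.enumerate_cons]
    by_cases hp : (PySem.Chars.upperChar a == 'P') = true
    · simp only [List.filter_cons, hp, if_true, List.map_cons, pvPos, ih, List.map_map]
      congr 1
      · omega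
      · exact List.map_congr_left fun x _ => by simp; ring
    · simp only [List.filter_cons, hp, if_false, Bool.false_eq_true, pvPos, List.map_map, ih]
      exact List.map_congr_left fun x _ => by simp; ring

lemma pv_pos_head (l : List Char) :
    (pvPos l).head? = (l.findIdx? (fun c => PySem.Chars.upperChar c == 'P')).map (fun n : Nat => (n : Int)) := by
  induction l with
  | nil => simp [pvPos]
  | cons a t ih =>
    by_cases hp : (PySem.Chars.upperChar a == 'P') = true
    · simp [pvPos, hp, List.findIdx?_cons]
    · simp only [pvPos, hp, if_false, Bool.false_eq_true, List.head?_map, ih, List.findIdx?_cons,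
        Option.map_map]
      cases t.findIdx? (fun c => PySem.Chars.upperChar c == 'P') <;> simp

lemma pv_pos_nonneg (l : List Char) (x : Int) (hx : x ∈ pvPos l) : 0 ≤ x := by
  induction l generalizing x with
  | nil => simp [pvPos] at hx
  | cons a t ih =>
    simp only [pvPos] at hx
    by_cases hp : (PySem.Chars.upperChar a == 'P') = true
    · rw [if_pos hp] at hx
      rcases List.mem_cons.mp hx with h | h
      · omega
      · obtain ⟨y, hy, rfl⟩ := List.mem_map.mp h
        have := ih y hy; omega
    · rw [if_neg hp] at hx
      obtain ⟨y, hy, rfl⟩ := List.mem_map.mp hx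
      have := ih y hy; omega

-- B's while loop computes pvG of the suffix it still has to visit
lemma pv_loopGo_spec (ps : List Int) (fuel s : Nat) (hfuel : ps.length ≤ s + fuel) :
    pvG (ps.drop s) s =
      (pvStartLoopGo ps fuel s,
       if pvStartLoopGo ps fuel s < ps.length then some (ps.getD (pvStartLoopGo ps fuel s) 0) else none) := by
  induction fuel generalizing s with
  | zero =>
    have hs : ¬ s < ps.length := by omega
    rw [List.drop_eq_nil_of_le (by omega), pvG, pvStartLoopGo, if_neg hs]
  | succ fuel ih =>
    by_cases hs : s < ps.length
    · rw [List.drop_eq_getElem_cons hs]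
      by_cases he : ps[s] = (s : Int)
      · have hrec : pvStartLoopGo ps (fuel + 1) s = pvStartLoopGo ps fuel (s + 1) := by
          rw [pvStartLoopGo]
          rw [if_pos ⟨hs, by rw [List.getD_eq_getElem _ _ hs]; exact he⟩]
        rw [hrec, pvG, if_pos he]
        exact ih (s + 1) (by omega)
      · have hstop : pvStartLoopGo ps (fuel + 1) s = s := by
          rw [pvStartLoopGo]
          rw [if_neg]
          rintro ⟨-, h⟩
          rw [List.getD_eq_getElem _ _ hs] at h
          exact he h
        rw [pvG, if_neg he, hstop, if_pos hs, List.getD_eq_getElem _ _ hs]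
    · have hstop : pvStartLoopGo ps (fuel + 1) s = s := by
        rw [pvStartLoopGo]; rw [if_neg]; rintro ⟨h, -⟩; exact hs h
      rw [List.drop_eq_nil_of_le (by omega), pvG, hstop, if_neg hs]

lemma pv_loop_spec (ps : List Int) (s : Nat) :
    pvG (ps.drop s) s =
      (pvStartLoop ps s,
       if pvStartLoop ps s < ps.length then some (ps.getD (pvStartLoop ps s) 0) else none) := by
  exact pv_loopGo_spec ps (ps.length - s) s (by omega)

-- pvG on the position list: the leading run length and the first later padding position
lemma pv_g_char (l : List Char) (s : Nat) :
    pvG ((pvPos l).map (· + (s : Int))) s =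
      (match l.dropWhile (fun c => PySem.Chars.upperChar c == 'P') with
       | [] => (s + (l.takeWhile (fun c => PySem.Chars.upperChar c == 'P')).length, none)
       | _ :: rest => (s + (l.takeWhile (fun c => PySem.Chars.upperChar c == 'P')).length,
           (rest.findIdx? (fun c => PySem.Chars.upperChar c == 'P')).map
             (fun idx : Nat => (s : Int) + ((l.takeWhile (fun c => PySem.Chars.upperChar c == 'P')).length : Int) + 1 + (idx : Int)))) := by
  induction l generalizing s with
  | nil => simp [pvPos, pvG]
  | cons a t ih =>
    by_cases hp : (PySem.Chars.upperChar a == 'P') = true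
    · have hmap : ((pvPos t).map (· + (1 : Int))).map (· + (s : Int))
          = (pvPos t).map (· + ((s + 1 : Nat) : Int)) := by
        rw [List.map_map]
        exact List.map_congr_left fun x _ => by simp; ring
      simp only [pvPos, hp, if_true, List.map_cons, pvG, zero_add, hmap, ih,
        List.takeWhile_cons, List.dropWhile_cons]
      cases h : t.dropWhile (fun c => PySem.Chars.upperChar c == 'P') with
      | nil =>
        simp only [Prod.mk.injEq, List.length_cons]
        exact ⟨by omega, trivial⟩
      | cons c0 rest =>
        simp only [Prod.mk.injEq, List.length_cons]
        refine ⟨by omega, ?_⟩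
        congr 1
        funext idx
        push_cast; ring
    · simp only [pvPos, hp, if_false, Bool.false_eq_true, List.takeWhile_cons, List.dropWhile_cons,
        List.length_nil]
      cases h : pvPos t with
      | nil =>
        have hf : t.findIdx? (fun c => PySem.Chars.upperChar c == 'P') = none := by
          have h2 := (pv_pos_head t).symm
          rw [h] at h2
          simp only [List.head?_nil, Option.map_eq_none_iff] at h2
          exact h2
        simp [pvG, hf]
      | cons p rest =>
        have hp0 : 0 ≤ p := pv_pos_nonneg t p (h ▸ List.mem_cons_self)
        obtain ⟨idx, hidx, hpi⟩ : ∃ idx, t.findIdx? (fun c => PySem.Chars.upperChar c == 'P') = some idx ∧ (idx : Int) = p := by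
          have := pv_pos_head t
          rw [h] at this
          cases hf : t.findIdx? (fun c => PySem.Chars.upperChar c == 'P') with
          | none => rw [hf] at this; simp at this
          | some i => rw [hf] at this; simp at this; exact ⟨i, rfl, this.symm⟩
        have hne : ¬ (p + 1 + (s : Int) = (s : Int)) := by omega
        simp only [List.map_cons, List.map_map, pvG, hne, if_false, hidx, Option.map_some,
          Prod.mk.injEq, Option.some.injEq]
        refine ⟨by omega, ?_⟩
        omega

-- ===== VERDICT (by name: the statement is the Claim_ definition above) =====
theorem deduct_padding_spec : Claim_equal_deduct_padding := by
  intro seq _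
  unfold Spec_deduct_padding
  have hmap0 : ∀ xs : List Int, xs.map (· + ((0 : Nat) : Int)) = xs := by
    intro xs
    rw [show (fun x : Int => x + ((0 : Nat) : Int)) = id from funext fun x => by simp]
    exact List.map_id _
  have hps : (((PySem.List.enumerate seq.toList 0).filter
        (fun p => PySem.Chars.upperChar p.2 == 'P')).map (fun p => p.1)) = pvPos seq.toList := by
    rw [show (0 : Int) = ((0 : Nat) : Int) from rfl, pv_enum_filter, hmap0]
  have hchar := pv_g_char seq.toList 0
  rw [hmap0] at hchar
  have hloop := pv_loop_spec (pvPos seq.toList) 0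
  rw [List.drop_zero] at hloop
  have hcomb := hloop.symm.trans hchar
  simp only [deduct_padding, deduct_padding_alt, hps]
  rw [pv_aGo_pad]
  cases hd : seq.toList.dropWhile (fun c => PySem.Chars.upperChar c == 'P') with
  | nil =>
    rw [hd] at hcomb
    dsimp only at hcomb ⊢
    have h1 := congrArg Prod.fst hcomb
    have h2 := congrArg Prod.snd hcomb
    simp only at h1 h2
    have hnlt : ¬ pvStartLoop (pvPos seq.toList) 0 < (pvPos seq.toList).length := by
      intro hlt; rw [if_pos hlt] at h2; cases h2
    rw [if_neg hnlt]
    simp only [Prod.mk.injEq, h1]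
    exact ⟨by push_cast; omega, trivial⟩
  | cons c0 rest =>
    rw [hd] at hcomb
    dsimp only at hcomb ⊢
    rw [pv_aGo_scan]
    have h1 := congrArg Prod.fst hcomb
    have h2 := congrArg Prod.snd hcomb
    simp only at h1 h2
    cases hf : rest.findIdx? (fun c => PySem.Chars.upperChar c == 'P') with
    | none =>
      rw [hf] at h2
      simp only [Option.map_none] at h2
      have hnlt : ¬ pvStartLoop (pvPos seq.toList) 0 < (pvPos seq.toList).length := by
        intro hlt; rw [if_pos hlt] at h2; cases h2
      rw [if_neg hnlt]
      simp only [Prod.mk.injEq, h1]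
      exact ⟨by push_cast; omega, trivial⟩
    | some idx =>
      rw [hf] at h2
      simp only [Option.map_some] at h2
      have hlt : pvStartLoop (pvPos seq.toList) 0 < (pvPos seq.toList).length := by
        by_contra hn; rw [if_neg hn] at h2; cases h2
      rw [if_pos hlt] at h2
      rw [if_pos hlt]
      have hv := Option.some.inj h2
      simp only [Prod.mk.injEq, hv]
      constructor
      · rw [h1]; push_cast; omega
      · push_cast; omega
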